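-- pv_equiv track=rewrite | github.com/aogundimu/python_stuff | principle_of_computing/Algorithmic_thinking/Part 2/Week 4/project_sub.py | find_maximum_value_index
-- ===== SOURCE A (Python) =====
-- def find_maximum_value_index(matrix):
--     """
--     This method finds the maximum value and its index in a 2-d array
--     """
--
--     max_value = matrix[0][0]
--     row_index = 0
--     column_index = 0
--
--     for row in range(0, len(matrix)):
--         for column in range(0, len(matrix[row])):
--             if matrix[row][column] > max_value:
--                 max_value = matrix[row][column]
--                 row_index = row
--                 column_index = column
--
--     return (row_index, column_index)
-- ===== SOURCE B (Python) =====
-- def find_maximum_value_index(matrix):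
--     """
--     Two-pass: summarize each non-empty row as (row max, row, first column of
--     that max), then scan the summaries for the earliest row with the best max.
--     """
--     summaries = []
--     for r, row in enumerate(matrix):
--         if row:
--             m = max(row)
--             summaries.append((m, r, row.index(m)))
--     best = summaries[0]
--     for s in summaries[1:]:
--         if s[0] > best[0]:
--             best = s
--     return (best[1], best[2])
-- ===== Notes on version B (the rewrite author's own statement) =====
-- stated objective: alternative
-- what changed: Replaces the index-based nested running-max loops by a two-pass decomposition: each non-empty row is summarized once as (max(row), row, row.index(max)) and a second scan of the summaries picks the earliest row with the best max.
import Mathlib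
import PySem

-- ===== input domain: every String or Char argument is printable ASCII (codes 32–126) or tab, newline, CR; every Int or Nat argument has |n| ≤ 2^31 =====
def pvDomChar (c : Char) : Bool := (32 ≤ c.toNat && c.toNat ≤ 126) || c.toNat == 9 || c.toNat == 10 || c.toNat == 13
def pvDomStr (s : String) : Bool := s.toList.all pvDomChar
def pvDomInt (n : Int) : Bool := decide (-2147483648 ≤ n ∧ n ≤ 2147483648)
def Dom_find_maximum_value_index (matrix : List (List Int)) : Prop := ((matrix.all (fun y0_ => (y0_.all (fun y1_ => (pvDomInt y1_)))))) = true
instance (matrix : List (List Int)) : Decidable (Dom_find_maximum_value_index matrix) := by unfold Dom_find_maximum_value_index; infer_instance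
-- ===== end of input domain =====

-- B replaces A's nested index loops by a two-pass decomposition (per-row (max, first column) summaries,
-- then a scan of the summaries); same cost, equal return value on every input where A returns.

-- ===== PORT A =====
def find_maximum_value_index (matrix : List (List Int)) : Int × Int :=
  -- max_value/row_index/column_index are the fold state; matrix[row][column] is re-read as in the Python text
  (PySem.List.pyRange 0 (matrix.length : Int) 1).foldl
    (fun (st : Int × Int × Int) row =>
      (PySem.List.pyRange 0 ((PySem.List.pyGetD matrix row []).length : Int) 1).foldl
        (fun (st : Int × Int × Int) col =>
          if st.1 < PySem.List.pyGetD (PySem.List.pyGetD matrix row []) col 0 then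
            (PySem.List.pyGetD (PySem.List.pyGetD matrix row []) col 0, row, col)
          else st) st)
    (PySem.List.pyGetD (PySem.List.pyGetD matrix 0 []) 0 0, 0, 0)
  |> fun st => (st.2.1, st.2.2)

-- ===== PORT B =====
-- summary of one non-empty row p = (r, row): (max(row), r, row.index(max(row)))
def pvSummary (p : Int × List Int) : Int × Int × Int :=
  let m := p.2.tail.foldl max (p.2.headD 0)   -- max(row) as Python's running max
  (m, p.1, ((PySem.List.index? p.2 m).getD 0 : Int))

def find_maximum_value_index_alt (matrix : List (List Int)) : Int × Int :=
  let summaries := (PySem.List.enumerate matrix 0).foldl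
    (fun acc p => if !p.2.isEmpty then acc ++ [pvSummary p] else acc) []
  match summaries with
  | [] => (0, 0)      -- unreachable under Pre_ (summaries[0] raises in Python)
  | b :: rest =>
    let best := rest.foldl (fun best s => if s.1 > best.1 then s else best) b
    (best.2.1, best.2.2)

-- ===== PRECONDITION & SPEC =====
-- A raises IndexError on matrix[0][0] exactly when the matrix or its first row is empty.
def Pre_find_maximum_value_index (matrix : List (List Int)) : Prop := matrix.headD [] ≠ []
instance (matrix : List (List Int)) : Decidable (Pre_find_maximum_value_index matrix) := by unfold Pre_find_maximum_value_index; infer_instance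
def pvWitness_find_maximum_value_index : List (List Int) := [[1, 3], [2]]

def Spec_find_maximum_value_index (matrix : List (List Int)) (out : Int × Int) : Prop := out = find_maximum_value_index_alt matrix
instance (matrix : List (List Int)) (out : Int × Int) : Decidable (Spec_find_maximum_value_index matrix out) := by unfold Spec_find_maximum_value_index; infer_instance

-- ===== CLAIM (what is proved, stated in full; the proofs are below) =====
def Claim_equal_find_maximum_value_index : Prop := ∀ (matrix : List (List Int)), Dom_find_maximum_value_index matrix → Pre_find_maximum_value_index matrix → Spec_find_maximum_value_index matrix (find_maximum_value_index matrix)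

-- ===== LEMMAS AND PROOFS =====

-- running max commutes with its initial value
lemma pvFoldlMaxInit : ∀ (t : List Int) (a b : Int), t.foldl max (max a b) = max a (t.foldl max b) := by
  intro t
  induction t with
  | nil => intro a b; rfl
  | cons y t ih =>
    intro a b
    simp only [List.foldl_cons, max_assoc]
    exact ih a (max b y)

-- the step of B's second pass
def pvBest (best s : Int × Int × Int) : Int × Int × Int := if s.1 > best.1 then s else best

-- a fold over range(len(xs)) reading xs[j] is a fold over enumerate(xs)
lemma pvFoldlRangeEnum {α β : Type} (xs : List α) (d : α) (F : β → Int → α → β) (init : β) :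
    (PySem.List.pyRange 0 (xs.length : Int) 1).foldl (fun st j => F st j (PySem.List.pyGetD xs j d)) init
      = (PySem.List.enumerate xs 0).foldl (fun st p => F st p.1 p.2) init := by
  rw [PySem.List.enumerate_eq_map_pyRange xs d, List.foldl_map, PySem.List.len_eq]

-- A's inner column loop over a non-empty row = compare with the row summary
lemma pvInnerChar (r : Int) : ∀ (t : List Int) (x s : Int) (st : Int × Int × Int),
    (PySem.List.enumerate (x :: t) s).foldl
        (fun st (p : Int × Int) => if st.1 < p.2 then (p.2, r, p.1) else st) st
      = (let m := t.foldl max x;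
         if st.1 < m then (m, r, s + ((PySem.List.index? (x :: t) m).getD 0 : Int)) else st) := by
  intro t
  induction t with
  | nil =>
    intro x s st
    simp [PySem.List.enumerate_cons, PySem.List.enumerate_nil]
  | cons y t ih =>
    intro x s st
    rw [PySem.List.enumerate_cons, List.foldl_cons, ih y (s + 1)]
    have hm : (y :: t).foldl max x = max x (t.foldl max y) := by
      simp only [List.foldl_cons]; exact pvFoldlMaxInit t x y
    set m' := t.foldl max y with hm'
    have hmem : m' ∈ y :: t := by
      rcases PySem.List.foldl_max_mem t y with h | h
      · exact h ▸ List.mem_cons_self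
      · exact List.mem_cons_of_mem _ h
    have hidx : (PySem.List.index? (y :: t) m').isSome = true :=
      (PySem.List.index?_isSome_iff _ _).mpr hmem
    obtain ⟨k, hk⟩ := Option.isSome_iff_exists.mp hidx
    simp only [hm]
    by_cases hxm : x < m'
    · have hne : x ≠ m' := ne_of_lt hxm
      have hidx2 : PySem.List.index? (x :: y :: t) m' = some (k + 1) := by
        rw [PySem.List.index?_cons_of_ne _ hne, hk]; rfl
      rw [max_eq_right hxm.le, hidx2]
      by_cases h1 : st.1 < x
      · rw [if_pos h1]
        have h2 : x < m' := hxm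
        rw [if_pos h2, if_pos (lt_trans h1 hxm), hk]
        simp only [Option.getD_some]
        refine Prod.ext rfl (Prod.ext rfl ?_)
        push_cast; ring
      · rw [if_neg h1]
        by_cases h2 : st.1 < m'
        · rw [if_pos h2, if_pos h2, hk]
          simp only [Option.getD_some]
          refine Prod.ext rfl (Prod.ext rfl ?_)
          push_cast; ring
        · rw [if_neg h2, if_neg h2]
    · have hmx : max x m' = x := max_eq_left (le_of_not_gt hxm)
      rw [hmx, PySem.List.index?_cons_self]
      by_cases h1 : st.1 < x
      · rw [if_pos h1, if_pos h1]
        have h2 : ¬ x < m' := hxm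
        rw [if_neg h2]
        simp
      · rw [if_neg h1]
        have h2 : ¬ st.1 < m' := fun h => h1 (lt_of_lt_of_le h (le_of_not_gt hxm))
        rw [if_neg h2, if_neg h1]

-- A's whole row scan = B's best-fold over the summaries, from any initial state
lemma pvOuterChar (rows : List (Int × List Int)) (st : Int × Int × Int) :
    rows.foldl
        (fun st p =>
          (PySem.List.enumerate p.2 0).foldl
            (fun st (q : Int × Int) => if st.1 < q.2 then (q.2, p.1, q.1) else st) st) st
      = ((rows.filter (fun p => !p.2.isEmpty)).map pvSummary).foldl pvBest st := by
  rw [List.foldl_map,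
    ← PySem.List.foldl_if_eq_foldl_filter (fun p => !p.2.isEmpty)
        (fun st p => pvBest st (pvSummary p)) rows st]
  apply PySem.List.foldl_congr_mem
  intro acc p _
  match p with
  | (r, []) => simp [PySem.List.enumerate_nil]
  | (r, x :: t) =>
    rw [pvInnerChar r t x 0 acc]
    simp [pvBest, pvSummary, gt_iff_lt]

theorem find_maximum_value_index_spec : Claim_equal_find_maximum_value_index := by
  intro matrix _ hpre
  show find_maximum_value_index matrix = find_maximum_value_index_alt matrix
  match matrix, hpre with
  | [], hpre => exact absurd rfl hpre
  | [] :: rest, hpre => exact absurd rfl hpre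
  | (x :: t) :: rest, _ =>
    -- B side: summaries in filter/map form
    unfold find_maximum_value_index_alt
    rw [PySem.List.foldl_append_if (fun p => !p.2.isEmpty) pvSummary
          (PySem.List.enumerate ((x :: t) :: rest) 0) []]
    rw [PySem.List.enumerate_cons]
    simp only [List.nil_append, List.filter_cons, List.isEmpty_cons, Bool.not_false, if_true]
    -- A side
    unfold find_maximum_value_index
    beta_reduce
    rw [pvFoldlRangeEnum ((x :: t) :: rest) []
          (fun st j row =>
            (PySem.List.pyRange 0 (row.length : Int) 1).foldl
              (fun (st : Int × Int × Int) col =>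
                if st.1 < PySem.List.pyGetD row col 0 then (PySem.List.pyGetD row col 0, j, col)
                else st) st)]
    have hinner : ∀ (st : Int × Int × Int) (p : Int × List Int),
        (PySem.List.pyRange 0 (p.2.length : Int) 1).foldl
            (fun (st : Int × Int × Int) col =>
              if st.1 < PySem.List.pyGetD p.2 col 0 then (PySem.List.pyGetD p.2 col 0, p.1, col)
              else st) st
          = (PySem.List.enumerate p.2 0).foldl
              (fun st (q : Int × Int) => if st.1 < q.2 then (q.2, p.1, q.1) else st) st := by
      intro st p
      exact pvFoldlRangeEnum p.2 0 (fun st c v => if st.1 < v then (v, p.1, c) else st) st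
    rw [PySem.List.foldl_congr_mem _ _ _ _ (fun acc p _ => hinner acc p)]
    rw [pvOuterChar]
    rw [PySem.List.enumerate_cons]
    simp only [List.filter_cons, List.isEmpty_cons, Bool.not_false, List.map_cons]
    -- initial value of A is x, and absorbing it into the first summary is the identity
    have hinit : PySem.List.pyGetD (PySem.List.pyGetD ((x :: t) :: rest) 0 []) 0 0 = x := by
      simp [PySem.List.pyGetD, PySem.List.pyGet?, PySem.List.pyIdx?]
    have hs0 : pvBest (x, 0, 0) (pvSummary (0, x :: t)) = pvSummary (0, x :: t) := by
      unfold pvBest pvSummary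
      simp only [List.tail_cons, List.headD_cons]
      by_cases h : t.foldl max x > x
      · rw [if_pos h]
      · rw [if_neg h]
        have hx : t.foldl max x = x :=
          le_antisymm (le_of_not_gt h) (PySem.List.le_foldl_max t x).1
        rw [hx, PySem.List.index?_cons_self]
        rfl
    rw [hinit]
    simp only [if_true, List.map_cons, List.foldl_cons, hs0]
    rfl
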